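-- pv_equiv track=rewrite | github.com/cpti372/python_code | 0417.py | pro
-- ===== SOURCE A (Python) =====
-- def pro(n):
--     for i in range(0,10):
--         case=0
--         num=n
--         while num!=0:
--             if num %10 ==i:
--                 case+=1
--             num=num//10
--         if case !=1:
--             return False
--     return True
-- ===== SOURCE B (Python) =====
-- def pro(n):
--     counts = [0] * 10
--     num = n
--     while num != 0:
--         counts[num % 10] += 1
--         num = num // 10
--     return all(c == 1 for c in counts)
-- ===== Notes on version B (the rewrite author's own statement) =====
-- stated objective: alternative
-- what changed: B extracts the digits in a single num%10/num//10 pass into a count table of the ten digits and then checks that every count equals one, instead of A's ten separate digit-extraction scans (one per digit of range(10)).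
import Mathlib
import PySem

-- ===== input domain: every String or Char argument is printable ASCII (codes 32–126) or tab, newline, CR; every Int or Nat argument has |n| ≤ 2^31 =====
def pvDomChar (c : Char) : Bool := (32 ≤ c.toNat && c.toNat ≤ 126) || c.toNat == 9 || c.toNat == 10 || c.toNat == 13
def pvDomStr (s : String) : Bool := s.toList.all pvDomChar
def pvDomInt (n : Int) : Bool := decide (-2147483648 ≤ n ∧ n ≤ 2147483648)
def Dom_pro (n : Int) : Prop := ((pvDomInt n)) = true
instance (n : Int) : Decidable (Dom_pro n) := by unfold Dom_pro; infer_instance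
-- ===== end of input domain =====

-- B replaces A's ten repeated digit-extraction scans by a single scan into a count
-- table over the ten digits, followed by a check that every count equals one (objective: alternative).

-- ===== PORT A =====
-- A's inner while loop: count occurrences of digit i in num (the Python loop runs
-- forever on n < 0; the port carries the nonnegative value as Nat via n.toNat).
def countCase (num : Nat) (i : Int) (c : Int) : Int :=
  if h : num = 0 then c
  else countCase (num / 10) i (if (num : Int) % 10 = i then c + 1 else c)
  termination_by num
  decreasing_by exact Nat.div_lt_self (Nat.pos_of_ne_zero h) (by omega)

-- A's for-loop over range(0,10) with early return False
def proLoop (n : Nat) : List Int → Bool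
  | [] => true
  | i :: rest => if countCase n i 0 ≠ 1 then false else proLoop n rest

def pro (n : Int) : Bool := proLoop n.toNat (PySem.List.pyRange 0 10 1)

-- ===== PORT B =====
-- B's single while loop: one pass over the digits, incrementing counts[num % 10]
def digitCounts (num : Nat) (counts : List Int) : List Int :=
  if h : num = 0 then counts
  else digitCounts (num / 10) (counts.set (num % 10) (counts.getD (num % 10) 0 + 1))
  termination_by num
  decreasing_by exact Nat.div_lt_self (Nat.pos_of_ne_zero h) (by omega)

def pro_alt (n : Int) : Bool :=
  (digitCounts n.toNat (List.replicate 10 0)).all (fun c => c == 1)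

-- ===== PRECONDITION & SPEC =====
-- (no Pre_: both ports are total; the Python while-loop runs forever on n < 0 in both
-- programs alike, and the ports agree on every Int)
def Spec_pro (n : Int) (out : Bool) : Prop := out = pro_alt n
instance (n : Int) (out : Bool) : Decidable (Spec_pro n out) := by unfold Spec_pro; infer_instance

-- ===== CLAIM (what is proved, stated in full; the proofs are below) =====
def Claim_equal_pro : Prop := ∀ (n : Int), Dom_pro n → Spec_pro n (pro n)

-- ===== LEMMAS AND PROOFS =====

-- the mathematical digit count, same recursion shape
def cnt (num : Nat) (i : Int) : Int :=
  if h : num = 0 then 0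
  else (if (num : Int) % 10 = i then 1 else 0) + cnt (num / 10) i
  termination_by num
  decreasing_by exact Nat.div_lt_self (Nat.pos_of_ne_zero h) (by omega)

theorem countCase_eq (num : Nat) (i : Int) (c : Int) : countCase num i c = c + cnt num i := by
  fun_induction countCase num i c with
  | case1 => rw [cnt]; simp
  | case2 num' c' h ih =>
    rw [cnt, dif_neg h]
    simp only [dite_eq_ite] at ih ⊢
    split_ifs at ih ⊢ with hc
    · rw [ih]; ring
    · rw [ih]; ring

theorem proLoop_eq_all (n : Nat) (l : List Int) :
    proLoop n l = l.all (fun i => countCase n i 0 == 1) := by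
  induction l with
  | nil => rfl
  | cons i rest ih =>
    simp only [proLoop, List.all_cons, ih]
    by_cases h : countCase n i 0 = 1 <;> simp [h]

theorem digitCounts_length (num : Nat) (counts : List Int) :
    (digitCounts num counts).length = counts.length := by
  fun_induction digitCounts num counts with
  | case1 => rfl
  | case2 num counts h ih => rw [ih, List.length_set]

theorem digitCounts_getD (num : Nat) (counts : List Int) (hlen : counts.length = 10)
    (d : Nat) (hd : d < 10) :
    (digitCounts num counts).getD d 0 = counts.getD d 0 + cnt num (d : Int) := by
  fun_induction digitCounts num counts with
  | case1 counts' =>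
    rw [cnt]; simp
  | case2 num counts h ih =>
    have hm : num % 10 < 10 := Nat.mod_lt _ (by omega)
    have hlen' : (counts.set (num % 10) (counts.getD (num % 10) 0 + 1)).length = 10 := by
      rw [List.length_set, hlen]
    rw [ih hlen']
    conv_rhs => rw [cnt]
    rw [dif_neg h]
    have hcast : ((num : Int) % 10 = (d : Int)) ↔ (num % 10 = d) := by omega
    have hset : (counts.set (num % 10) (counts.getD (num % 10) 0 + 1)).getD d 0 =
        if num % 10 = d then counts.getD d 0 + 1 else counts.getD d 0 := by
      by_cases hdd : num % 10 = d
      · subst hdd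
        rw [if_pos rfl]
        simp [List.getD, hlen, hm]
      · rw [if_neg hdd]
        simp [List.getD, hdd]
    rw [hset]
    by_cases hdd : num % 10 = d
    · rw [if_pos hdd, if_pos (hcast.mpr hdd)]; ring
    · rw [if_neg hdd, if_neg (fun hh => hdd (hcast.mp hh))]; ring

theorem final_counts (num : Nat) :
    digitCounts num (List.replicate 10 0) =
      [cnt num 0, cnt num 1, cnt num 2, cnt num 3, cnt num 4,
       cnt num 5, cnt num 6, cnt num 7, cnt num 8, cnt num 9] := by
  have hlen : (digitCounts num (List.replicate 10 0)).length = 10 := by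
    rw [digitCounts_length]; rfl
  apply List.ext_getElem
  · rw [hlen]; rfl
  · intro i h1 h2
    have hi : i < 10 := by rw [hlen] at h1; exact h1
    have hmain := digitCounts_getD num (List.replicate 10 0) (by rfl) i hi
    rw [List.getD_eq_getElem _ _ h1] at hmain
    rw [hmain]
    interval_cases i <;> simp

-- ===== VERDICT (by name: the statement is the Claim_ definition above) =====
theorem pro_spec : Claim_equal_pro := by
  intro n _
  show pro n = pro_alt n
  rw [pro, pro_alt, proLoop_eq_all, final_counts]
  have hr : PySem.List.pyRange 0 10 1 = [0,1,2,3,4,5,6,7,8,9] := by decide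
  rw [hr]
  simp only [List.all_cons, List.all_nil, countCase_eq, zero_add]
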